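-- pv_equiv track=rewrite | github.com/lukasmayr83/PR_DKE_Gruppe02 | Ticket/app/routes.py | _slice_between
-- ===== SOURCE A (Python) =====
-- def _slice_between(names: list[str], start_name: str, end_name: str) -> list[str]:
--     """
--     Sucht "kleinste" Teilsequenz start..end innerhalb names
--     (falls Bahnhof mehrfach vorkommt, nimmt er die kürzeste passende Strecke)
--     """
--     starts = [i for i, n in enumerate(names) if n == start_name]
--     ends = [j for j, n in enumerate(names) if n == end_name]
--     best = None
--
--     for i in starts:
--         for j in ends:
--             if j > i:
--                 if best is None or (j - i) < (best[1] - best[0]):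
--                     best = (i, j)
--
--     if not best:
--         return []
--     i, j = best
--     return names[i:j + 1]
-- ===== SOURCE B (Python) =====
-- def _slice_between(names: list[str], start_name: str, end_name: str) -> list[str]:
--     # One left-to-right pass: for each end occurrence the nearest preceding
--     # start occurrence is the best partner, so track only the last start seen.
--     last = None
--     best = None
--     for j, n in enumerate(names):
--         if n == end_name and last is not None:
--             if best is None or j - last < best[1] - best[0]:
--                 best = (last, j)
--         if n == start_name:
--             last = j
--     if not best:
--         return []
--     i, j = best
--     return names[i:j + 1]
-- ===== Notes on version B (the rewrite author's own statement) =====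
-- stated objective: faster
-- what changed: Replaced A's nested loop over all start-index/end-index pairs by a single left-to-right pass that tracks only the most recent start occurrence, since the nearest preceding start is always the best partner for each end occurrence.
import Mathlib
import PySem

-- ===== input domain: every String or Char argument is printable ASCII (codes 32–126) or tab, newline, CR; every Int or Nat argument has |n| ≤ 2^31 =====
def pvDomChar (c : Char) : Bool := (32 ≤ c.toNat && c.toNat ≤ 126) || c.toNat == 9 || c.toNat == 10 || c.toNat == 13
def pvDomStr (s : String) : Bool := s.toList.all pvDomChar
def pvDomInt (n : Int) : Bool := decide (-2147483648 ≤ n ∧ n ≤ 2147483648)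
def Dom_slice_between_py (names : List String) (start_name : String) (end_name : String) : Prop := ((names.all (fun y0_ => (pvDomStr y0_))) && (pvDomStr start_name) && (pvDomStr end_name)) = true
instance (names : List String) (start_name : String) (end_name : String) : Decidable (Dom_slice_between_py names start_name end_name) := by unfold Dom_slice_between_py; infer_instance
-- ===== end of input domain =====

-- B replaces A's quadratic scan over all start/end index pairs by a single left-to-right
-- pass that tracks only the most recent start occurrence (objective: faster, O(n^2) → O(n)).

-- ===== PORT A =====
-- A-side helper: the body of A's inner loop over `ends` (best-update with the j > i guard)
def pvAStep (i : Int) (b : Option (Int × Int)) (j : Int) : Option (Int × Int) :=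
  if i < j then
    match b with
    | none => some (i, j)
    | some (bi, bj) => if j - i < bj - bi then some (i, j) else some (bi, bj)
  else b

def slice_between_py (names : List String) (start_name : String) (end_name : String) : List String :=
  let starts := ((PySem.List.enumerate names).filter (fun p => p.2 == start_name)).map Prod.fst
  let ends := ((PySem.List.enumerate names).filter (fun p => p.2 == end_name)).map Prod.fst
  let best := starts.foldl (fun b i => ends.foldl (pvAStep i) b) (none : Option (Int × Int))
  match best with
  | none => []
  | some (i, j) => PySem.List.slice names (some i) (some (j + 1))

-- ===== PORT B =====
-- B-side helper: the body of B's single loop (candidate check against `last`, then update `last`)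
def pvBStep (start_name end_name : String) (st : Option Int × Option (Int × Int)) (p : Int × String) :
    Option Int × Option (Int × Int) :=
  let best :=
    if p.2 == end_name then
      match st.1 with
      | none => st.2
      | some i =>
        match st.2 with
        | none => some (i, p.1)
        | some (bi, bj) => if p.1 - i < bj - bi then some (i, p.1) else some (bi, bj)
    else st.2
  let last := if p.2 == start_name then some p.1 else st.1
  (last, best)

def slice_between_py_alt (names : List String) (start_name : String) (end_name : String) : List String :=
  let r := (PySem.List.enumerate names).foldl (pvBStep start_name end_name)
    ((none : Option Int), (none : Option (Int × Int)))
  match r.2 with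
  | none => []
  | some (i, j) => PySem.List.slice names (some i) (some (j + 1))

-- ===== PRECONDITION & SPEC =====
def Spec_slice_between_py (names : List String) (start_name : String) (end_name : String) (out : List String) : Prop := out = slice_between_py_alt names start_name end_name
instance (names : List String) (start_name : String) (end_name : String) (out : List String) : Decidable (Spec_slice_between_py names start_name end_name out) := by unfold Spec_slice_between_py; infer_instance

-- ===== CLAIM (what is proved, stated in full; the proofs are below) =====
def Claim_equal_slice_between_py : Prop := ∀ (names : List String) (start_name : String) (end_name : String), Dom_slice_between_py names start_name end_name → Spec_slice_between_py names start_name end_name (slice_between_py names start_name end_name)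

-- ===== LEMMAS AND PROOFS =====

def pvM (b : Option (Int × Int)) (p : Int × Int) : Option (Int × Int) :=
  match b with
  | none => some p
  | some q => if p.2 - p.1 < q.2 - q.1 then some p else some q

def pvCand (s e : String) (l : Option Int) : List (Int × String) → List (Int × Int)
  | [] => []
  | (j, n) :: t =>
      (if n == e then (match l with | some i => [(i, j)] | none => []) else [])
        ++ pvCand s e (if n == s then some j else l) t

def pvP (E : List (Int × String)) (s e : String) : List (Int × Int) :=
  ((E.filter (fun p => p.2 == s)).map Prod.fst).flatMap
    (fun i => (((E.filter (fun p => p.2 == e)).map Prod.fst).filter (fun j => i < j)).map (fun j => (i, j)))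

def pvRel (p x : Int × Int) : Prop :=
  p.2 - p.1 < x.2 - x.1 ∨ (p.2 - p.1 = x.2 - x.1 ∧ p.1 ≤ x.1)

def pvT (p q : Int × Int) : Prop := p.2 - p.1 = q.2 - q.1 → p.1 < q.1

lemma pvA_inner (i : Int) : ∀ (ends : List Int) (b : Option (Int × Int)),
    ends.foldl (pvAStep i) b = List.foldl pvM b ((ends.filter (fun j => i < j)).map (fun j => (i, j))) := by
  intro ends
  induction ends with
  | nil => intro b; rfl
  | cons j t ih =>
    intro b
    by_cases h : i < j
    · simp only [List.foldl_cons, List.filter_cons, decide_eq_true_eq, if_pos h, List.map_cons]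
      have hstep : pvAStep i b j = pvM b (i, j) := by
        cases b <;> simp [pvAStep, pvM, h]
      rw [hstep, ih]
    · simp only [List.foldl_cons, List.filter_cons, decide_eq_true_eq, if_neg h, pvAStep]
      exact ih b

lemma pv_outer (ends : List Int) : ∀ (starts : List Int) (b : Option (Int × Int)),
    starts.foldl (fun b i => ends.foldl (pvAStep i) b) b
      = List.foldl pvM b (starts.flatMap (fun i => ((ends.filter (fun j => i < j)).map (fun j => (i, j))))) := by
  intro starts
  induction starts with
  | nil => intro b; rfl
  | cons i t ih =>
    intro b
    simp only [List.foldl_cons, List.flatMap_cons, List.foldl_append]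
    rw [pvA_inner, ih]

lemma pvA_fold (E : List (Int × String)) (s e : String) :
    (((E.filter (fun p => p.2 == s)).map Prod.fst).foldl
        (fun b i => (((E.filter (fun p => p.2 == e)).map Prod.fst).foldl (pvAStep i) b))
        (none : Option (Int × Int)))
      = List.foldl pvM none (pvP E s e) := by
  rw [pv_outer]; rfl

lemma pvB_fold (s e : String) : ∀ (E : List (Int × String)) (l : Option Int) (b : Option (Int × Int)),
    (E.foldl (pvBStep s e) (l, b)).2 = List.foldl pvM b (pvCand s e l E) := by
  intro E
  induction E with
  | nil => intro l b; rfl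
  | cons p t ih =>
    intro l b
    obtain ⟨j, n⟩ := p
    simp only [List.foldl_cons, pvCand, List.foldl_append]
    have hstep : pvBStep s e (l, b) (j, n)
        = ((if n == s then some j else l),
           List.foldl pvM b (if n == e then (match l with | some i => [(i, j)] | none => []) else [])) := by
      by_cases he : n == e
      · cases l <;> cases b <;> simp [pvBStep, he, pvM]
      · simp [pvBStep, he]
    rw [hstep, ih]

lemma pv_foldl_some : ∀ (L : List (Int × Int)) (q : Int × Int),
    (List.foldl pvM (some q) L).isSome := by
  intro L
  induction L with
  | nil => intro q; rfl
  | cons p t ih =>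
    intro q
    simp only [List.foldl_cons, pvM]
    split <;> apply ih

lemma pv_foldl_none (L : List (Int × Int)) (h : List.foldl pvM none L = none) : L = [] := by
  cases L with
  | nil => rfl
  | cons p t =>
    exfalso
    have := pv_foldl_some t p
    simp only [List.foldl_cons, pvM] at h
    rw [h] at this; simp at this

lemma pvF' : ∀ (L : List (Int × Int)) (b : Option (Int × Int)) (p : Int × Int),
    L.Pairwise pvT →
    (∀ q, b = some q → ∀ x ∈ L, q.2 - q.1 = x.2 - x.1 → q.1 < x.1) →
    List.foldl pvM b L = some p →
    (b = some p ∨ p ∈ L) ∧ (∀ x ∈ L, pvRel p x) ∧ (∀ q, b = some q → pvRel p q) := by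
  intro L
  induction L with
  | nil =>
    intro b p _ _ h
    simp only [List.foldl_nil] at h
    exact ⟨Or.inl h, by simp, fun q hq => by rw [h] at hq; injection hq with hq; subst hq; exact Or.inr ⟨rfl, le_refl _⟩⟩
  | cons a t ih =>
    intro b p hT hb hf
    have hT' := List.pairwise_cons.mp hT
    simp only [List.foldl_cons] at hf
    have hb' : ∀ q, pvM b a = some q → ∀ x ∈ t, q.2 - q.1 = x.2 - x.1 → q.1 < x.1 := by
      intro q hq x hx
      cases hbv : b with
      | none =>
        rw [hbv] at hq; simp only [pvM] at hq
        injection hq with hq; subst hq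
        exact hT'.1 x hx
      | some q0 =>
        rw [hbv] at hq; simp only [pvM] at hq
        split at hq
        · injection hq with hq; subst hq; exact hT'.1 x hx
        · injection hq with hq; subst hq
          exact hb q0 hbv x (List.mem_cons_of_mem _ hx)
    obtain ⟨h1, h2, h3⟩ := ih (pvM b a) p hT'.2 hb' hf
    refine ⟨?_, ?_, ?_⟩
    · rcases h1 with h1 | h1
      · cases hbv : b with
        | none =>
          rw [hbv] at h1; simp only [pvM] at h1
          injection h1 with h1; exact Or.inr (h1 ▸ List.mem_cons_self)
        | some q0 =>
          rw [hbv] at h1; simp only [pvM] at h1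
          split at h1
          · injection h1 with h1; exact Or.inr (h1 ▸ List.mem_cons_self)
          · injection h1 with h1; exact Or.inl (congrArg some h1)
      · exact Or.inr (List.mem_cons_of_mem _ h1)
    · intro x hx
      rcases List.mem_cons.mp hx with rfl | hx
      · -- x = a: relate through the accumulator step
        cases hbv : b with
        | none => exact h3 x (by rw [hbv]; simp [pvM])
        | some q0 =>
          by_cases hlt : x.2 - x.1 < q0.2 - q0.1
          · refine h3 x ?_
            rw [hbv]; simp only [pvM]
            rw [if_pos hlt]
          · have hq0 := h3 q0 (by rw [hbv]; simp only [pvM]; rw [if_neg hlt])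
            unfold pvRel at hq0 ⊢
            rcases hq0 with h | h
            · left; omega
            · -- span p = span q0 ≤ span x
              by_cases hsp : q0.2 - q0.1 = x.2 - x.1
              · have := hb q0 hbv x (by rw [hsp] at *; exact List.mem_cons_self) hsp
                right; omega
              · left; omega
      · exact h2 x hx
    · intro q hq
      cases hbv : b with
      | none => rw [hbv] at hq; exact absurd hq (by simp)
      | some q0 =>
        rw [hbv] at hq; injection hq with hq
        rw [← hq]
        by_cases hlt : a.2 - a.1 < q0.2 - q0.1
        · have ha := h3 a (by rw [hbv]; simp only [pvM]; rw [if_pos hlt])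
          have hq0 := hb q0 hbv
          unfold pvRel at ha ⊢
          rcases ha with h | h
          · left; omega
          · left; omega
        · exact h3 q0 (by rw [hbv]; simp only [pvM]; rw [if_neg hlt])

lemma pvBest_unique {L : List (Int × Int)} {p p' : Int × Int}
    (h : p ∈ L ∧ ∀ x ∈ L, pvRel p x) (h' : p' ∈ L ∧ ∀ x ∈ L, pvRel p' x) : p = p' := by
  obtain ⟨hm, hall⟩ := h
  obtain ⟨hm', hall'⟩ := h'
  have h1 := hall p' hm'
  have h2 := hall' p hm
  unfold pvRel at h1 h2
  have : p.1 = p'.1 ∧ p.2 = p'.2 := by omega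
  exact Prod.ext this.1 this.2

lemma pv_mem_starts (E : List (Int × String)) (s : String) (i : Int) :
    i ∈ (E.filter (fun p => p.2 == s)).map Prod.fst ↔ (i, s) ∈ E := by
  simp only [List.mem_map, List.mem_filter, beq_iff_eq]
  constructor
  · rintro ⟨⟨a, b⟩, ⟨hmem, rfl⟩, rfl⟩; exact hmem
  · intro h; exact ⟨(i, s), ⟨h, rfl⟩, rfl⟩

lemma pv_mem_P (E : List (Int × String)) (s e : String) (i j : Int) :
    (i, j) ∈ pvP E s e ↔ (i, s) ∈ E ∧ (j, e) ∈ E ∧ i < j := by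
  unfold pvP
  rw [List.mem_flatMap]
  constructor
  · rintro ⟨a, ha, hmem⟩
    rw [List.mem_map] at hmem
    obtain ⟨jj, hj, heq⟩ := hmem
    rw [List.mem_filter] at hj
    simp only [Prod.mk.injEq] at heq
    obtain ⟨rfl, rfl⟩ := heq
    exact ⟨(pv_mem_starts _ _ _).1 ha, (pv_mem_starts _ _ _).1 hj.1, by simpa using hj.2⟩
  · rintro ⟨h1, h2, h3⟩
    refine ⟨i, (pv_mem_starts _ _ _).2 h1, ?_⟩
    rw [List.mem_map]
    exact ⟨j, List.mem_filter.mpr ⟨(pv_mem_starts _ _ _).2 h2, by simpa using h3⟩, rfl⟩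

lemma pv_mem_cand (s e : String) : ∀ (E : List (Int × String)) (l : Option Int),
    E.Pairwise (fun a b => a.1 < b.1) →
    (∀ i, l = some i → ∀ q ∈ E, i < q.1) →
    ∀ p ∈ pvCand s e l E, ((p.1, s) ∈ E ∨ l = some p.1) ∧ (p.2, e) ∈ E ∧ p.1 < p.2 := by
  intro E
  induction E with
  | nil => intro l _ _ p hp; simp [pvCand] at hp
  | cons q t ih =>
    intro l hE hl p hp
    obtain ⟨j, n⟩ := q
    simp only [pvCand] at hp
    rw [List.mem_append] at hp
    rcases hp with hp | hp
    · -- head candidate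
      by_cases he : n == e
      · rw [if_pos he] at hp
        cases hlv : l with
        | none => rw [hlv] at hp; simp at hp
        | some i =>
          rw [hlv] at hp; simp only [List.mem_singleton] at hp
          subst hp
          have hij : i < j := hl i hlv (j, n) List.mem_cons_self
          refine ⟨Or.inr (by simpa using hlv), ?_, hij⟩
          have : n = e := beq_iff_eq.mp he
          subst this; exact List.mem_cons_self
      · rw [if_neg he] at hp; simp at hp
    · have hE' := List.pairwise_cons.mp hE
      have hl' : ∀ i, (if n == s then some j else l) = some i → ∀ q ∈ t, i < q.1 := by
        intro i hi q hq
        by_cases hs : n == s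
        · rw [if_pos hs] at hi
          injection hi with hi; subst hi
          exact hE'.1 q hq
        · rw [if_neg hs] at hi
          exact hl i hi q (List.mem_cons_of_mem _ hq)
      obtain ⟨h1, h2, h3⟩ := ih (if n == s then some j else l) hE'.2 hl' p hp
      refine ⟨?_, List.mem_cons_of_mem _ h2, h3⟩
      rcases h1 with h1 | h1
      · exact Or.inl (List.mem_cons_of_mem _ h1)
      · by_cases hs : n == s
        · rw [if_pos hs] at h1
          injection h1 with h1
          left
          have : n = s := beq_iff_eq.mp hs
          subst this; rw [← h1]; exact List.mem_cons_self
        · rw [if_neg hs] at h1; exact Or.inr h1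

lemma pv_cand_dom (s e : String) : ∀ (E : List (Int × String)) (l : Option Int),
    E.Pairwise (fun a b => a.1 < b.1) →
    (∀ i, l = some i → ∀ q ∈ E, i < q.1) →
    ∀ i j : Int, ((i, s) ∈ E ∨ l = some i) → (j, e) ∈ E → i < j →
    ∃ c ∈ pvCand s e l E, c.2 = j ∧ i ≤ c.1 := by
  intro E
  induction E with
  | nil => intro l _ _ i j hi hj _; simp at hj
  | cons q t ih =>
    intro l hE hl i j hi hj hij
    obtain ⟨k, n⟩ := q
    have hE' := List.pairwise_cons.mp hE
    have hl' : ∀ i, (if n == s then some k else l) = some i → ∀ q ∈ t, i < q.1 := by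
      intro i hi q hq
      by_cases hs : n == s
      · rw [if_pos hs] at hi; injection hi with hi; subst hi; exact hE'.1 q hq
      · rw [if_neg hs] at hi; exact hl i hi q (List.mem_cons_of_mem _ hq)
    by_cases hjk : j = k
    · -- the end occurrence is the head; the start must come from `l`
      subst hjk
      have hne : (j, e) ∉ t := by
        intro hmem
        exact absurd (hE'.1 (j, e) hmem) (by omega)
      have hhead : n = e := by
        rcases List.mem_cons.mp hj with h | h
        · exact (Prod.mk.injEq .. ▸ h.symm).2
        · exact absurd h hne
      have hlv : l = some i := by
        rcases hi with h | h
        · rcases List.mem_cons.mp h with h' | h'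
          · exfalso
            have := (Prod.mk.injEq .. ▸ h'.symm).1; omega
          · exfalso; exact absurd (hE'.1 (i, s) h') (by omega)
        · exact h
      refine ⟨(i, j), ?_, rfl, le_refl i⟩
      simp only [pvCand, hhead, hlv, beq_self_eq_true, if_pos]
      simp
    · -- the end occurrence is in the tail
      have hjt : (j, e) ∈ t := by
        rcases List.mem_cons.mp hj with h | h
        · exact absurd (Prod.mk.injEq .. ▸ h.symm).1.symm hjk
        · exact h
      have hkj : k < j := hE'.1 (j, e) hjt
      have hnext : ∃ i', ((i', s) ∈ t ∨ (if n == s then some k else l) = some i') ∧ i ≤ i' ∧ i' < j := by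
        by_cases hs : n == s
        · rcases hi with h | h
          · rcases List.mem_cons.mp h with h' | h'
            · refine ⟨k, Or.inr (by rw [if_pos hs]), ?_, hkj⟩
              have := (Prod.mk.injEq .. ▸ h'.symm).1; omega
            · exact ⟨i, Or.inl h', le_refl i, hij⟩
          · exact ⟨k, Or.inr (by rw [if_pos hs]), le_of_lt (hl i h (k, n) List.mem_cons_self), hkj⟩
        · rcases hi with h | h
          · rcases List.mem_cons.mp h with h' | h'
            · -- head is (i, s) but n ≠ s: contradiction
              exfalso
              obtain ⟨h1, h2⟩ := Prod.mk.injEq .. ▸ h'.symm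
              exact hs (by rw [h2]; exact beq_self_eq_true s)
            · exact ⟨i, Or.inl h', le_refl i, hij⟩
          · exact ⟨i, Or.inr (by rw [if_neg hs]; exact h), le_refl i, hij⟩
      obtain ⟨i', hi', hii', hi'j⟩ := hnext
      obtain ⟨c, hc, hcj, hic⟩ := ih (if n == s then some k else l) hE'.2 hl' i' j hi' hjt hi'j
      refine ⟨c, ?_, hcj, le_trans hii' hic⟩
      simp only [pvCand]
      exact List.mem_append_right _ hc

lemma pv_cand_pairwise (s e : String) : ∀ (E : List (Int × String)) (l : Option Int),
    E.Pairwise (fun a b => a.1 < b.1) →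
    (∀ i, l = some i → ∀ q ∈ E, i < q.1) →
    (pvCand s e l E).Pairwise (fun p q => p.2 < q.2) := by
  intro E
  induction E with
  | nil => intro l _ _; exact List.Pairwise.nil
  | cons q t ih =>
    intro l hE hl
    obtain ⟨k, n⟩ := q
    have hE' := List.pairwise_cons.mp hE
    have hl' : ∀ i, (if n == s then some k else l) = some i → ∀ q ∈ t, i < q.1 := by
      intro i hi q hq
      by_cases hs : n == s
      · rw [if_pos hs] at hi; injection hi with hi; subst hi; exact hE'.1 q hq
      · rw [if_neg hs] at hi; exact hl i hi q (List.mem_cons_of_mem _ hq)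
    simp only [pvCand]
    rw [List.pairwise_append]
    refine ⟨?_, ih _ hE'.2 hl', ?_⟩
    · by_cases he : n == e
      · rw [if_pos he]; cases l
        · simp
        · exact List.pairwise_singleton _ _
      · rw [if_neg he]; simp
    · intro a ha b hb
      have hbt := pv_mem_cand s e t _ hE'.2 hl' b hb
      have hb2 : k < b.2 := hE'.1 (b.2, e) hbt.2.1
      by_cases he : n == e
      · rw [if_pos he] at ha
        cases hlv : l with
        | none => rw [hlv] at ha; simp at ha
        | some i =>
          rw [hlv] at ha; simp only [List.mem_singleton] at ha
          subst ha; simp only []; exact hb2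
      · rw [if_neg he] at ha; simp at ha

lemma pv_P_pairwise (E : List (Int × String)) (s e : String)
    (hE : E.Pairwise (fun a b => a.1 < b.1)) : (pvP E s e).Pairwise pvT := by
  have hstarts : ((E.filter (fun p => p.2 == s)).map Prod.fst).Pairwise (· < ·) := by
    rw [List.pairwise_map]
    exact (hE.filter _)
  have hends : ((E.filter (fun p => p.2 == e)).map Prod.fst).Pairwise (· < ·) := by
    rw [List.pairwise_map]
    exact (hE.filter _)
  unfold pvP
  -- generalize over the sorted starts list
  revert hstarts
  generalize ((E.filter (fun p => p.2 == e)).map Prod.fst) = ends at *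
  generalize ((E.filter (fun p => p.2 == s)).map Prod.fst) = starts
  induction starts with
  | nil => intro _; exact List.Pairwise.nil
  | cons i t ih =>
    intro hst
    have hst' := List.pairwise_cons.mp hst
    simp only [List.flatMap_cons]
    rw [List.pairwise_append]
    refine ⟨?_, ih hst'.2, ?_⟩
    · rw [List.pairwise_map]
      have hp : (ends.filter (fun j => decide (i < j))).Pairwise (· < ·) := hends.filter _
      refine hp.imp ?_
      intro a b hab
      unfold pvT
      intro hsp
      exfalso
      simp only [] at hsp
      omega
    · intro a ha b hb
      simp only [List.mem_map, List.mem_filter] at ha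
      obtain ⟨j1, _, rfl⟩ := ha
      rw [List.mem_flatMap] at hb
      obtain ⟨i2, hi2, hb⟩ := hb
      simp only [List.mem_map, List.mem_filter] at hb
      obtain ⟨j2, _, rfl⟩ := hb
      have : i < i2 := hst'.1 i2 hi2
      intro _
      simpa using this

lemma pv_key (E : List (Int × String)) (s e : String)
    (hE : E.Pairwise (fun a b => a.1 < b.1)) :
    List.foldl pvM none (pvP E s e) = List.foldl pvM none (pvCand s e none E) := by
  have hl : ∀ i, (none : Option Int) = some i → ∀ q ∈ E, i < q.1 := by simp
  cases hA : List.foldl pvM none (pvP E s e) with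
  | none =>
    have hP : pvP E s e = [] := pv_foldl_none _ hA
    cases hB : List.foldl pvM none (pvCand s e none E) with
    | none => rfl
    | some c =>
      exfalso
      have hC : pvCand s e none E ≠ [] := by
        intro h; rw [h] at hB; simp at hB
      obtain ⟨c0, hc0⟩ := List.exists_mem_of_ne_nil _ hC
      have hm := pv_mem_cand s e E none hE hl c0 hc0
      have : (c0.1, c0.2) ∈ pvP E s e :=
        (pv_mem_P E s e c0.1 c0.2).2 ⟨hm.1.resolve_right (by simp), hm.2.1, hm.2.2⟩
      rw [hP] at this; simp at this
  | some pA =>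
    have hPne : pvP E s e ≠ [] := by
      intro h; rw [h] at hA; simp at hA
    obtain ⟨p0, hp0⟩ := List.exists_mem_of_ne_nil _ hPne
    obtain ⟨hp1, hp2, hp3⟩ := (pv_mem_P E s e p0.1 p0.2).1 (by simpa using hp0)
    obtain ⟨c, hc, _, _⟩ := pv_cand_dom s e E none hE hl p0.1 p0.2 (Or.inl hp1) hp2 hp3
    cases hB : List.foldl pvM none (pvCand s e none E) with
    | none =>
      exfalso
      have := pv_foldl_none _ hB
      rw [this] at hc; simp at hc
    | some pB =>
      have hTP := pv_P_pairwise E s e hE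
      have hTC : (pvCand s e none E).Pairwise pvT := by
        refine (pv_cand_pairwise s e E none hE hl).imp ?_
        intro a b hab
        unfold pvT
        omega
      obtain ⟨hA1, hA2, _⟩ := pvF' _ none pA hTP (by simp) hA
      obtain ⟨hB1, hB2, _⟩ := pvF' _ none pB hTC (by simp) hB
      have hAmem : pA ∈ pvP E s e := hA1.resolve_left (by simp)
      have hBmemC : pB ∈ pvCand s e none E := hB1.resolve_left (by simp)
      have hBm := pv_mem_cand s e E none hE hl pB hBmemC
      have hBP : pB ∈ pvP E s e := by
        have := (pv_mem_P E s e pB.1 pB.2).2 ⟨hBm.1.resolve_right (by simp), hBm.2.1, hBm.2.2⟩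
        simpa using this
      have hBall : ∀ x ∈ pvP E s e, pvRel pB x := by
        intro x hx
        obtain ⟨hx1, hx2, hx3⟩ := (pv_mem_P E s e x.1 x.2).1 (by simpa using hx)
        obtain ⟨cx, hcx, hcx2, hcx1⟩ := pv_cand_dom s e E none hE hl x.1 x.2 (Or.inl hx1) hx2 hx3
        have hrel := hB2 cx hcx
        unfold pvRel at hrel ⊢
        omega
      rw [pvBest_unique ⟨hAmem, hA2⟩ ⟨hBP, hBall⟩]

-- ===== VERDICT (by name: the statement is the Claim_ definition above) =====
theorem slice_between_py_spec : Claim_equal_slice_between_py := by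
  intro names s e _
  unfold Spec_slice_between_py slice_between_py slice_between_py_alt
  simp only []
  rw [pvA_fold, pvB_fold, pv_key _ _ _ (PySem.List.pairwise_lt_enumerate names 0)]
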